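-- pv_equiv track=rewrite | github.com/lfy79001/S3Eval | s3eval/custom_template_parser.py | calculate_times
-- ===== SOURCE A (Python) =====
-- def calculate_times(process, sql):
--     times = 0
--     aggregate_word = ['sum', 'avg']
--     math_op = ['+', '-', '*', '/']
--     for word in sql.split():
--         if word.lower() in aggregate_word:
--             times += 1
--         elif word.lower() in math_op:
--             times += 1
--     return times
-- ===== SOURCE B (Python) =====
-- def calculate_times(process, sql):
--     freq = {}
--     for word in sql.split():
--         w = word.lower()
--         freq[w] = freq.get(w, 0) + 1
--     return sum(freq.get(t, 0) for t in ['sum', 'avg', '+', '-', '*', '/'])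
-- ===== Notes on version B (the rewrite author's own statement) =====
-- stated objective: alternative
-- what changed: B builds a frequency table of the lowercased words in one pass and then sums the counts of the six fixed target tokens, instead of testing each word's membership in the two target lists inside the loop.
import Mathlib
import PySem

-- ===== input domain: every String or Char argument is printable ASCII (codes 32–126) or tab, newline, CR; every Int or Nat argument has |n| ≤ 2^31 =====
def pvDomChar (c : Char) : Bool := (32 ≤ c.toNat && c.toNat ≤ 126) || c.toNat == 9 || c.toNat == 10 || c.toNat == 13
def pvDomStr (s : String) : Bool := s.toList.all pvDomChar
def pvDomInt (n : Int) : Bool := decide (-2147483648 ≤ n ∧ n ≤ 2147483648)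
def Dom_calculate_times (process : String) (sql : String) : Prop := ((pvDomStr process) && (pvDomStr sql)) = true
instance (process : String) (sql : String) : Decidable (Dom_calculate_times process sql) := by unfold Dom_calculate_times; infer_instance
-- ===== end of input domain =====

-- B builds a frequency table of the lowercased words and sums the counts of the six target tokens (alternative decomposition, same cost class).

-- ===== PORT A =====
def calculate_times (process : String) (sql : String) : Int :=
  let aggregate_word : List String := ["sum", "avg"]
  let math_op : List String := ["+", "-", "*", "/"]
  (PySem.Str.split₀ sql).foldl
    (fun times word =>
      if aggregate_word.contains (PySem.Str.lower word) then times + 1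
      else if math_op.contains (PySem.Str.lower word) then times + 1
      else times) 0

-- ===== PORT B =====
def calculate_times_alt (process : String) (sql : String) : Int :=
  let freq : PySem.Dict String Int :=
    (PySem.Str.split₀ sql).foldl
      (fun d word =>
        let w := PySem.Str.lower word
        d.insert w (d.getD w 0 + 1))
      PySem.Dict.empty
  (["sum", "avg", "+", "-", "*", "/"] : List String).foldl
    (fun acc t => acc + freq.getD t 0) 0

-- ===== PRECONDITION & SPEC =====
def Spec_calculate_times (process : String) (sql : String) (out : Int) : Prop := out = calculate_times_alt process sql
instance (process : String) (sql : String) (out : Int) : Decidable (Spec_calculate_times process sql out) := by unfold Spec_calculate_times; infer_instance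

-- ===== CLAIM (what is proved, stated in full; the proofs are below) =====
def Claim_equal_calculate_times : Prop := ∀ (process : String) (sql : String), Dom_calculate_times process sql → Spec_calculate_times process sql (calculate_times process sql)

-- ===== LEMMAS AND PROOFS =====

-- A counts, over the lowercased words, membership in the two target lists; B sums the six per-target counts.
theorem key_count (ws : List String) (t0 : Int) :
    ws.foldl
      (fun times w =>
        if (["sum", "avg"] : List String).contains w then times + 1
        else if (["+", "-", "*", "/"] : List String).contains w then times + 1
        else times) t0
    = t0 + ((ws.count "sum" : Int) + (ws.count "avg" : Int) + (ws.count "+" : Int)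
        + (ws.count "-" : Int) + (ws.count "*" : Int) + (ws.count "/" : Int)) := by
  induction ws generalizing t0 with
  | nil => simp
  | cons w rest ih =>
    simp only [List.foldl_cons, List.count_cons, ih]
    by_cases h1 : w = "sum" <;> by_cases h2 : w = "avg" <;> by_cases h3 : w = "+" <;>
      by_cases h4 : w = "-" <;> by_cases h5 : w = "*" <;> by_cases h6 : w = "/" <;>
      simp [h1, h2, h3, h4, h5, h6] <;> ring

-- ===== VERDICT (by name: the statement is the Claim_ definition above) =====
theorem calculate_times_spec : Claim_equal_calculate_times := by
  intro process sql _
  unfold Spec_calculate_times calculate_times calculate_times_alt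
  simp only []
  rw [show ((PySem.Str.split₀ sql).foldl
      (fun d word => d.insert (PySem.Str.lower word) (d.getD (PySem.Str.lower word) 0 + 1))
      PySem.Dict.empty)
    = PySem.Dict.counter ((PySem.Str.split₀ sql).map PySem.Str.lower) from by
      rw [← PySem.Dict.foldl_insert_getD_add_one_eq_counter, List.foldl_map]]
  rw [show ((PySem.Str.split₀ sql).foldl
      (fun times word =>
        if (["sum", "avg"] : List String).contains (PySem.Str.lower word) then times + 1
        else if (["+", "-", "*", "/"] : List String).contains (PySem.Str.lower word) then times + 1
        else times) (0 : Int))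
    = ((PySem.Str.split₀ sql).map PySem.Str.lower).foldl
      (fun times w =>
        if (["sum", "avg"] : List String).contains w then times + 1
        else if (["+", "-", "*", "/"] : List String).contains w then times + 1
        else times) (0 : Int) from by rw [List.foldl_map]]
  rw [key_count]
  simp [PySem.Dict.getD_counter]
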